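-- pv_equiv track=rewrite | github.com/invaderskywalker/data_engineer | src/trmeric_services/provider/quantum/utils.py | map_payment_days
-- ===== SOURCE A (Python) =====
-- def map_payment_days(value) -> int:
--     """Map payment days to a numerical category."""
--     if isinstance(value, str):
--         return 0
--     ranges = [
--         ((0, 15), 1),
--         ((16, 30), 2),
--         ((31, 45), 3),
--         ((46, 60), 4),
--         ((61, 90), 5),
--         ((91, float('inf')), 6)
--     ]
--     value = int(value)
--     for (low, high), category in ranges:
--         if low <= value <= high:
--             return category
--     return 0
-- ===== SOURCE B (Python) =====
-- import bisect
--
-- _THRESHOLDS = [0, 16, 31, 46, 61, 91]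
--
-- def map_payment_days(value) -> int:
--     """Map payment days to a numerical category."""
--     if isinstance(value, str):
--         return 0
--     return bisect.bisect_right(_THRESHOLDS, int(value))
-- ===== Notes on version B (the rewrite author's own statement) =====
-- stated objective: idiomatic
-- what changed: Replaces the linear first-match scan over (range, category) tuples (with a float('inf') sentinel) by bisect.bisect_right on a fixed sorted threshold list, whose index is the category.
import Mathlib
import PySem

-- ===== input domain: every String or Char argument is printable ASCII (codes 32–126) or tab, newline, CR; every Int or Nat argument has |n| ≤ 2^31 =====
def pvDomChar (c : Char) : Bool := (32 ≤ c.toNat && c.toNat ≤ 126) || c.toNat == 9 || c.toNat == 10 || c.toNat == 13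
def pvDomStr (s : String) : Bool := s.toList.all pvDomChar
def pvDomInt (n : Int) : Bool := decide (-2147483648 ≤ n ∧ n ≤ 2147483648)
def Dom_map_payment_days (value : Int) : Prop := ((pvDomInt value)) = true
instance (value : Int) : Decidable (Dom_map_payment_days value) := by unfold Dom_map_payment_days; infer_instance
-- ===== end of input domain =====

-- B replaces A's linear scan over (range, category) tuples by bisect_right on a sorted threshold list (idiomatic; same result).
-- The Python parameter may also be a str (then A and B both return 0); under the type convention the argument is Int, so that branch is vacuous.
-- ===== PORT A =====
-- A's last range has high = float('inf'): ported as Option Int with none = +inf (v ≤ inf is always true); exact for Int inputs.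
def pvRangesA : List ((Int × Option Int) × Int) :=
  [((0, some 15), 1), ((16, some 30), 2), ((31, some 45), 3),
   ((46, some 60), 4), ((61, some 90), 5), ((91, none), 6)]

def pvLoopA : List ((Int × Option Int) × Int) → Int → Int
  | [], _ => 0
  | ((low, high), category) :: rest, v =>
    if low ≤ v && (match high with | some h => decide (v ≤ h) | none => true) then category
    else pvLoopA rest v

def map_payment_days (value : Int) : Int := pvLoopA pvRangesA value

-- ===== PORT B =====
def pvThresholds : List Int := [0, 16, 31, 46, 61, 91]

-- hand-written port of bisect.bisect_right (binary search, lo/hi halving), exact for sorted lists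
def pvBisectRight (a : List Int) (x : Int) (lo hi : Nat) : Nat :=
  if _h : lo < hi then
    let mid := (lo + hi) / 2
    if x < a.getD mid 0 then pvBisectRight a x lo mid
    else pvBisectRight a x (mid + 1) hi
  else lo
termination_by hi - lo
decreasing_by all_goals omega

def map_payment_days_alt (value : Int) : Int :=
  (pvBisectRight pvThresholds value 0 pvThresholds.length : Nat)

-- ===== PRECONDITION & SPEC =====
def Spec_map_payment_days (value : Int) (out : Int) : Prop := out = map_payment_days_alt value
instance (value : Int) (out : Int) : Decidable (Spec_map_payment_days value out) := by unfold Spec_map_payment_days; infer_instance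

-- ===== CLAIM (what is proved, stated in full; the proofs are below) =====
def Claim_equal_map_payment_days : Prop := ∀ (value : Int), Dom_map_payment_days value → Spec_map_payment_days value (map_payment_days value)

-- ===== LEMMAS AND PROOFS =====

-- ===== VERDICT (by name: the statement is the Claim_ definition above) =====
theorem map_payment_days_spec : Claim_equal_map_payment_days := by
  intro value _
  unfold Spec_map_payment_days map_payment_days map_payment_days_alt
  simp only [pvRangesA, pvThresholds, pvLoopA]
  simp [pvBisectRight.eq_def, List.getD]
  split_ifs <;> push_cast <;> omega
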